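-- pv_equiv track=rewrite | github.com/tdavislab/cloud-tracking | GWMT/utilities.py | have_adjacent_element
-- ===== SOURCE A (Python) =====
-- def have_adjacent_element(arr1, arr2):
--     """
--     Check if two arrays have at least one adjacent element using sets.
--     """
--     set_arr1 = {tuple(each) for each in arr1}
--     dirs = [[-1, -1], [-1, 0], [-1, 1], [0, -1], [0, 1], [1, -1], [1, 0], [1, 1]]
--     for ex, ey in arr2:
--         for dx, dy in dirs:
--             nx = ex + dx
--             ny = ey + dy
--             if (nx, ny) in set_arr1:
--                 return True
--     return False
-- ===== SOURCE B (Python) =====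
-- def have_adjacent_element(arr1, arr2):
--     """
--     Check if two arrays have at least one adjacent element using sets.
--     """
--     dirs = [[-1, -1], [-1, 0], [-1, 1], [0, -1], [0, 1], [1, -1], [1, 0], [1, 1]]
--     neighbors = set()
--     for x, y in arr1:
--         for dx, dy in dirs:
--             neighbors.add((x + dx, y + dy))
--     for e in arr2:
--         if tuple(e) in neighbors:
--             return True
--     return False
-- ===== Notes on version B (the rewrite author's own statement) =====
-- stated objective: alternative
-- what changed: B precomputes the 8-neighbour expansion of arr1 into one set, so the arr2 pass is a single membership test per element instead of an inner loop over directions; correctness relies on the symmetry of the direction set.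
import Mathlib
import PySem

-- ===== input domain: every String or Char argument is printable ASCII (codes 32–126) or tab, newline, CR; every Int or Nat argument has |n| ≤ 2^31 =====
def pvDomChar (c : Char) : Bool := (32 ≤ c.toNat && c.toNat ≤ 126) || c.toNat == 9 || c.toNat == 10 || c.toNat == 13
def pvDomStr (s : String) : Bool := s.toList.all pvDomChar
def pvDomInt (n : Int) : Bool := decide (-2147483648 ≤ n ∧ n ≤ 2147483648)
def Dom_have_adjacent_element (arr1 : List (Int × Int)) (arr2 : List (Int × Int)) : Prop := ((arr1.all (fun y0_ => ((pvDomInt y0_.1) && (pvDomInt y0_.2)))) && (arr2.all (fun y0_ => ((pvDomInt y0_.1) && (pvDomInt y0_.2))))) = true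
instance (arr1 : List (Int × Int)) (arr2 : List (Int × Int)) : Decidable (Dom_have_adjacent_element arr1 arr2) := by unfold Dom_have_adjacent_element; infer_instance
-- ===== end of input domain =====

-- B precomputes the 8-neighbour expansion of arr1 into one set, so the arr2 pass is a
-- single membership test per element (alternative decomposition, same cost).

-- the shared literal list of the 8 directions (the `dirs` constant of both Pythons)
def pvDirs : List (Int × Int) :=
  [(-1, -1), (-1, 0), (-1, 1), (0, -1), (0, 1), (1, -1), (1, 0), (1, 1)]

-- ===== PORT A =====
def have_adjacent_element (arr1 : List (Int × Int)) (arr2 : List (Int × Int)) : Bool :=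
  let set_arr1 : PySem.Set (Int × Int) := PySem.Set.ofList arr1
  arr2.any (fun e =>
    pvDirs.any (fun d => PySem.Set.contains set_arr1 (e.1 + d.1, e.2 + d.2)))

-- ===== PORT B =====
def have_adjacent_element_alt (arr1 : List (Int × Int)) (arr2 : List (Int × Int)) : Bool :=
  let neighbors : PySem.Set (Int × Int) :=
    arr1.foldl (fun s p =>
      pvDirs.foldl (fun s d => PySem.Set.add s (p.1 + d.1, p.2 + d.2)) s) PySem.Set.empty
  arr2.any (fun e => PySem.Set.contains neighbors e)

-- ===== PRECONDITION & SPEC =====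
def Spec_have_adjacent_element (arr1 : List (Int × Int)) (arr2 : List (Int × Int)) (out : Bool) : Prop := out = have_adjacent_element_alt arr1 arr2
instance (arr1 : List (Int × Int)) (arr2 : List (Int × Int)) (out : Bool) : Decidable (Spec_have_adjacent_element arr1 arr2 out) := by unfold Spec_have_adjacent_element; infer_instance

-- ===== CLAIM (what is proved, stated in full; the proofs are below) =====
def Claim_equal_have_adjacent_element : Prop := ∀ (arr1 : List (Int × Int)) (arr2 : List (Int × Int)), Dom_have_adjacent_element arr1 arr2 → Spec_have_adjacent_element arr1 arr2 (have_adjacent_element arr1 arr2)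

-- ===== LEMMAS AND PROOFS =====

-- the direction set is symmetric
theorem pvDirs_neg_mem {d : Int × Int} (hd : d ∈ pvDirs) : (-d.1, -d.2) ∈ pvDirs := by
  simp only [pvDirs, List.mem_cons, List.not_mem_nil, or_false] at hd ⊢
  rcases hd with h | h | h | h | h | h | h | h <;> subst h <;> simp

-- one element's 8 additions into the set (B's inner loop)
theorem mem_inner_fold (p : Int × Int) (ds : List (Int × Int)) (s : PySem.Set (Int × Int))
    (e : Int × Int) :
    e ∈ ds.foldl (fun s d => PySem.Set.add s (p.1 + d.1, p.2 + d.2)) s ↔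
    e ∈ s ∨ ∃ d ∈ ds, e = (p.1 + d.1, p.2 + d.2) := by
  induction ds generalizing s with
  | nil => simp
  | cons d rest ih =>
    simp only [List.foldl_cons, ih, PySem.Set.mem_add, List.mem_cons]
    constructor
    · rintro ((h | h) | ⟨d', hd', he⟩)
      exacts [Or.inl h, Or.inr ⟨d, Or.inl rfl, h⟩, Or.inr ⟨d', Or.inr hd', he⟩]
    · rintro (h | ⟨d', hd' | hd', he⟩)
      exacts [Or.inl (Or.inl h), Or.inl (Or.inr (hd' ▸ he)), Or.inr ⟨d', hd', he⟩]

-- membership in B's accumulated neighbour set (the outer loop)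
theorem mem_neighbors (arr1 : List (Int × Int)) (s : PySem.Set (Int × Int)) (e : Int × Int) :
    e ∈ arr1.foldl (fun s p =>
      pvDirs.foldl (fun s d => PySem.Set.add s (p.1 + d.1, p.2 + d.2)) s) s ↔
    e ∈ s ∨ ∃ p ∈ arr1, ∃ d ∈ pvDirs, e = (p.1 + d.1, p.2 + d.2) := by
  induction arr1 generalizing s with
  | nil => simp
  | cons p rest ih =>
    simp only [List.foldl_cons, ih, mem_inner_fold, List.mem_cons]
    constructor
    · rintro ((h | h) | ⟨q, hq, hd⟩)
      · exact Or.inl h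
      · exact Or.inr ⟨p, Or.inl rfl, h⟩
      · exact Or.inr ⟨q, Or.inr hq, hd⟩
    · rintro (h | ⟨q, hq | hq, hd⟩)
      · exact Or.inl (Or.inl h)
      · exact Or.inl (Or.inr (hq ▸ hd))
      · exact Or.inr ⟨q, hq, hd⟩

-- pointwise equivalence of the two per-element tests, via symmetry of pvDirs
theorem elem_test_iff (arr1 : List (Int × Int)) (e : Int × Int) :
    (∃ d ∈ pvDirs, (e.1 + d.1, e.2 + d.2) ∈ arr1) ↔
    (∃ p ∈ arr1, ∃ d ∈ pvDirs, e = (p.1 + d.1, p.2 + d.2)) := by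
  constructor
  · rintro ⟨d, hd, hp⟩
    exact ⟨_, hp, (-d.1, -d.2), pvDirs_neg_mem hd, by simp⟩
  · rintro ⟨p, hp, d, hd, he⟩
    refine ⟨(-d.1, -d.2), pvDirs_neg_mem hd, ?_⟩
    subst he; simpa using hp

-- ===== VERDICT (by name: the statement is the Claim_ definition above) =====
theorem have_adjacent_element_spec : Claim_equal_have_adjacent_element := by
  intro arr1 arr2 _
  unfold Spec_have_adjacent_element have_adjacent_element have_adjacent_element_alt
  rw [Bool.eq_iff_iff]
  simp only [List.any_eq_true, PySem.Set.contains_iff, PySem.Set.mem_ofList,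
    mem_neighbors, PySem.Set.empty, List.not_mem_nil, false_or]
  exact ⟨fun ⟨e, he, h⟩ => ⟨e, he, (elem_test_iff arr1 e).mp h⟩,
         fun ⟨e, he, h⟩ => ⟨e, he, (elem_test_iff arr1 e).mpr h⟩⟩
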